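-- pv_equiv track=rewrite | github.com/Andrewlearning/LcycRepo | lc/String/Parentheses(括号)/1249. 移除无效的括号.py | helper
-- ===== SOURCE A (Python) =====
-- def helper(string, open, close):
--     res = ""
--     count = 0
--
--     # 我们把多余的右括号先去除
--     for char in string:
--         if char == open:
--             count += 1
--
--         if char == close:
--             if count <= 0:
--                 continue
--             count -= 1
--
--         res += char
--
--     return res
-- ===== SOURCE B (Python) =====
-- def helper(string, open_, close):  # 'open' renamed open_ (checker forbids the builtin's name); positional use unchanged
--     # two passes: record indices of unmatched closers via a stack, then rebuild
--     stack = []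
--     remove = set()
--     for i, char in enumerate(string):
--         if char == open_:
--             stack.append(i)
--         if char == close:
--             if stack:
--                 stack.pop()
--             else:
--                 remove.add(i)
--     return ''.join(char for i, char in enumerate(string) if i not in remove)
-- ===== Notes on version B (the rewrite author's own statement) =====
-- stated objective: alternative
-- what changed: Replaces the single-pass scalar counter with append-to-result by a two-pass algorithm: a stack of open-bracket indices plus a set of indices of unmatched closers, then a filtering join over enumerate(string).
import Mathlib
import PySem

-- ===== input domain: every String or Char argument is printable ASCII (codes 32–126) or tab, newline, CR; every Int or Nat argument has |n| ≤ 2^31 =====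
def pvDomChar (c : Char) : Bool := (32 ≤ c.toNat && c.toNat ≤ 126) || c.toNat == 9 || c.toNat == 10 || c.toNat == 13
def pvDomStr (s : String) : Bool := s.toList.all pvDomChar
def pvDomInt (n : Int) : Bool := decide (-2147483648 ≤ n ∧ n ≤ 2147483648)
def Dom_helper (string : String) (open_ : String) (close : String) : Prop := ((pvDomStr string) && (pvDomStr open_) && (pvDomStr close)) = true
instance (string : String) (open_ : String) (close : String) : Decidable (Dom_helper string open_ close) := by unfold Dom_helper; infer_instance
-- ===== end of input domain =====

-- B replaces A's one-pass counter with a two-pass stack-of-indices + removal-set algorithm (objective: alternative, same cost).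

-- ===== PORT A =====
-- A's loop body ('for char in string: …'), one step of the fold over (res, count)
def aStep (open_ : String) (close : String) (st : List Char × Int) (ch : Char) : List Char × Int :=
  let res := st.1
  let count := if String.singleton ch == open_ then st.2 + 1 else st.2
  if String.singleton ch == close then
    if count ≤ 0 then (res, count)          -- 'continue'
    else (res ++ [ch], count - 1)
  else (res ++ [ch], count)

def helper (string : String) (open_ : String) (close : String) : String :=
  String.ofList (string.toList.foldl (aStep open_ close) ([], 0)).1

-- ===== PORT B =====
-- Source B's first-pass loop body over enumerate(string), state = (stack, remove)
def bStep (open_ : String) (close : String) (st : List Int × PySem.Set Int) (p : Int × Char) : List Int × PySem.Set Int :=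
  let stack := if String.singleton p.2 == open_ then st.1 ++ [p.1] else st.1
  if String.singleton p.2 == close then
    if stack ≠ [] then (stack.dropLast, st.2)        -- stack.pop()
    else (stack, PySem.Set.add st.2 p.1)             -- remove.add(i)
  else (stack, st.2)

def helper_alt (string : String) (open_ : String) (close : String) : String :=
  String.ofList (((PySem.List.enumerate string.toList).filter
    (fun p => !(PySem.Set.contains
      ((PySem.List.enumerate string.toList).foldl (bStep open_ close) ([], PySem.Set.empty)).2 p.1))).map (·.2))

-- ===== PRECONDITION & SPEC =====
def Spec_helper (string : String) (open_ : String) (close : String) (out : String) : Prop := out = helper_alt string open_ close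
instance (string : String) (open_ : String) (close : String) (out : String) : Decidable (Spec_helper string open_ close out) := by unfold Spec_helper; infer_instance

-- ===== CLAIM (what is proved, stated in full; the proofs are below) =====
def Claim_equal_helper : Prop := ∀ (string : String) (open_ : String) (close : String), Dom_helper string open_ close → Spec_helper string open_ close (helper string open_ close)

-- ===== LEMMAS AND PROOFS =====

-- the kept characters of A's loop from a given count, as a pure recursion
def aKeep (open_ : String) (close : String) : List Char → Int → List Char
  | [], _ => []
  | ch :: t, count =>
    let count := if String.singleton ch == open_ then count + 1 else count
    if String.singleton ch == close then
      if count ≤ 0 then aKeep open_ close t count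
      else ch :: aKeep open_ close t (count - 1)
    else ch :: aKeep open_ close t count

theorem aFold_eq_aKeep (open_ close : String) (cs : List Char) (res : List Char) (count : Int) :
    (cs.foldl (aStep open_ close) (res, count)).1 = res ++ aKeep open_ close cs count := by
  induction cs generalizing res count with
  | nil => simp [aKeep]
  | cons ch t ih =>
    rw [List.foldl_cons]
    by_cases ho : String.singleton ch == open_ <;> by_cases hc : String.singleton ch == close
    · by_cases hz : count + 1 ≤ 0
      · rw [show aStep open_ close (res, count) ch = (res, count + 1) by
          simp [aStep, ho, hc, hz]]
        rw [ih]; simp [aKeep, ho, hc, hz]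
      · rw [show aStep open_ close (res, count) ch = (res ++ [ch], count) by
          simp [aStep, ho, hc, hz]]
        rw [ih]; simp [aKeep, ho, hc, hz]
    · rw [show aStep open_ close (res, count) ch = (res ++ [ch], count + 1) by
        simp [aStep, ho, hc]]
      rw [ih]; simp [aKeep, ho, hc]
    · by_cases hz : count ≤ 0
      · rw [show aStep open_ close (res, count) ch = (res, count) by
          simp [aStep, ho, hc, hz]]
        rw [ih]; simp [aKeep, ho, hc, hz]
      · rw [show aStep open_ close (res, count) ch = (res ++ [ch], count - 1) by
          simp [aStep, ho, hc, hz]]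
        rw [ih]; simp [aKeep, ho, hc, hz]
    · rw [show aStep open_ close (res, count) ch = (res ++ [ch], count) by
        simp [aStep, ho, hc]]
      rw [ih]; simp [aKeep, ho, hc]

theorem pass1_mono (open_ close : String) (l : List (Int × Char)) (st : List Int) (R : PySem.Set Int)
    (i : Int) (hi : i ∈ (l.foldl (bStep open_ close) (st, R)).2) :
    i ∈ R ∨ ∃ p ∈ l, i = p.1 := by
  induction l generalizing st R with
  | nil => simp at hi; exact Or.inl hi
  | cons p t ih =>
    rw [List.foldl_cons] at hi
    have hb : (bStep open_ close (st, R) p).2 = R ∨ (bStep open_ close (st, R) p).2 = PySem.Set.add R p.1 := by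
      simp only [bStep]; split_ifs <;> simp
    rcases ih _ _ (by rw [show t.foldl (bStep open_ close) (bStep open_ close (st, R) p)
        = t.foldl (bStep open_ close) ((bStep open_ close (st, R) p).1, (bStep open_ close (st, R) p).2) from by rfl] at hi; exact hi)
      with h | ⟨q, hq, hq'⟩
    · rcases hb with hb | hb <;> rw [hb] at h
      · exact Or.inl h
      · rw [PySem.Set.mem_add] at h
        rcases h with h | h
        · exact Or.inl h
        · exact Or.inr ⟨p, by simp, h⟩
    · exact Or.inr ⟨q, by simp [hq], hq'⟩

theorem pass1_superset (open_ close : String) (l : List (Int × Char)) (st : List Int) (R : PySem.Set Int)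
    (i : Int) (hi : i ∈ R) : i ∈ (l.foldl (bStep open_ close) (st, R)).2 := by
  induction l generalizing st R with
  | nil => simpa using hi
  | cons p t ih =>
    rw [List.foldl_cons,
      show t.foldl (bStep open_ close) (bStep open_ close (st, R) p)
        = t.foldl (bStep open_ close) ((bStep open_ close (st, R) p).1, (bStep open_ close (st, R) p).2) from rfl]
    apply ih
    simp only [bStep]
    split_ifs <;> simp [PySem.Set.mem_add, hi]

-- the main invariant: filtering by the final remove-set equals A's kept characters,
-- when the current count is the stack length and everything already removed lies before position n
theorem main_lemma (open_ close : String) (cs : List Char) (n : Int)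
    (stack : List Int) (R : PySem.Set Int) (hR : ∀ i ∈ R, i < n) :
    ((PySem.List.enumerate cs n).filter
      (fun p => !(PySem.Set.contains ((PySem.List.enumerate cs n).foldl (bStep open_ close) (stack, R)).2 p.1))).map (·.2)
      = aKeep open_ close cs (stack.length : Int) := by
  induction cs generalizing n stack R with
  | nil => simp [PySem.List.enumerate_nil, aKeep]
  | cons ch t ih =>
    rw [PySem.List.enumerate_cons, List.foldl_cons]
    by_cases ho : String.singleton ch == open_ <;> by_cases hc : String.singleton ch == close
    · -- open and close: push then pop; kept, count unchanged
      have hstep : bStep open_ close (stack, R) (n, ch) = ((stack ++ [n]).dropLast, R) := by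
        simp [bStep, ho, hc]
      rw [hstep]
      have hkeep : n ∉ ((PySem.List.enumerate t (n+1)).foldl (bStep open_ close) ((stack ++ [n]).dropLast, R)).2 := by
        intro h
        rcases pass1_mono open_ close _ _ _ _ h with h' | ⟨q, hq, hq'⟩
        · exact absurd (hR n h') (lt_irrefl n)
        · rcases (PySem.List.mem_enumerate_iff _ _ _).mp hq with ⟨k, hk, rfl⟩
          simp at hq'; omega
      rw [List.filter_cons]
      rw [if_pos (by
        simp only [Bool.not_eq_eq_eq_not, Bool.not_true, PySem.Set.contains_eq_listContains]
        simp only [List.contains_eq_mem, decide_eq_false_iff_not]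
        exact hkeep)]
      rw [List.map_cons, ih (n+1) ((stack ++ [n]).dropLast) R (fun i h => lt_trans (hR i h) (by omega))]
      have hz : ¬ ((stack.length : Int) + 1 ≤ 0) := by omega
      simp [aKeep, ho, hc, hz]
    · -- open only: push; kept
      have hstep : bStep open_ close (stack, R) (n, ch) = (stack ++ [n], R) := by
        simp [bStep, ho, hc]
      rw [hstep]
      have hkeep : n ∉ ((PySem.List.enumerate t (n+1)).foldl (bStep open_ close) (stack ++ [n], R)).2 := by
        intro h
        rcases pass1_mono open_ close _ _ _ _ h with h' | ⟨q, hq, hq'⟩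
        · exact absurd (hR n h') (lt_irrefl n)
        · rcases (PySem.List.mem_enumerate_iff _ _ _).mp hq with ⟨k, hk, rfl⟩
          simp at hq'; omega
      rw [List.filter_cons]
      rw [if_pos (by
        simp only [Bool.not_eq_eq_eq_not, Bool.not_true, PySem.Set.contains_eq_listContains]
        simp only [List.contains_eq_mem, decide_eq_false_iff_not]
        exact hkeep)]
      rw [List.map_cons, ih (n+1) (stack ++ [n]) R (fun i h => lt_trans (hR i h) (by omega))]
      simp [aKeep, ho, hc]
    · -- close only
      by_cases hs : stack = []
      · -- unmatched closer: removed by B, skipped by A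
        subst hs
        have hstep : bStep open_ close (([] : List Int), R) (n, ch) = ([], PySem.Set.add R n) := by
          simp [bStep, ho, hc]
        rw [hstep]
        have hmem : n ∈ ((PySem.List.enumerate t (n+1)).foldl (bStep open_ close) (([] : List Int), PySem.Set.add R n)).2 :=
          pass1_superset _ _ _ _ _ _ (by simp [PySem.Set.mem_add])
        rw [List.filter_cons]
        rw [if_neg (by
          simp only [Bool.not_eq_eq_eq_not, Bool.not_true, PySem.Set.contains_eq_listContains]
          simp [List.contains_eq_mem, hmem])]
        rw [ih (n+1) ([] : List Int) (PySem.Set.add R n)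
          (by intro i hi; rw [PySem.Set.mem_add] at hi; rcases hi with h | h
              · exact lt_trans (hR i h) (by omega)
              · omega)]
        simp [aKeep, ho, hc]
      · -- matched closer: pop; kept
        have hne : stack ≠ [] := hs
        have hstep : bStep open_ close (stack, R) (n, ch) = (stack.dropLast, R) := by
          simp [bStep, ho, hc, hne]
        rw [hstep]
        have hkeep : n ∉ ((PySem.List.enumerate t (n+1)).foldl (bStep open_ close) (stack.dropLast, R)).2 := by
          intro h
          rcases pass1_mono open_ close _ _ _ _ h with h' | ⟨q, hq, hq'⟩
          · exact absurd (hR n h') (lt_irrefl n)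
          · rcases (PySem.List.mem_enumerate_iff _ _ _).mp hq with ⟨k, hk, rfl⟩
            simp at hq'; omega
        rw [List.filter_cons]
        rw [if_pos (by
          simp only [Bool.not_eq_eq_eq_not, Bool.not_true, PySem.Set.contains_eq_listContains]
          simp only [List.contains_eq_mem, decide_eq_false_iff_not]
          exact hkeep)]
        rw [List.map_cons, ih (n+1) stack.dropLast R (fun i h => lt_trans (hR i h) (by omega))]
        have hpos : 0 < stack.length := List.length_pos_of_ne_nil hne
        have hz : ¬ ((stack.length : Int) ≤ 0) := by omega
        have hcast : ((stack.length - 1 : Nat) : Int) = (stack.length : Int) - 1 := by omega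
        simp [aKeep, ho, hc, hs, hcast]
    · -- neither: kept, state unchanged
      have hstep : bStep open_ close (stack, R) (n, ch) = (stack, R) := by
        simp [bStep, ho, hc]
      rw [hstep]
      have hkeep : n ∉ ((PySem.List.enumerate t (n+1)).foldl (bStep open_ close) (stack, R)).2 := by
        intro h
        rcases pass1_mono open_ close _ _ _ _ h with h' | ⟨q, hq, hq'⟩
        · exact absurd (hR n h') (lt_irrefl n)
        · rcases (PySem.List.mem_enumerate_iff _ _ _).mp hq with ⟨k, hk, rfl⟩
          simp at hq'; omega
      rw [List.filter_cons]
      rw [if_pos (by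
        simp only [Bool.not_eq_eq_eq_not, Bool.not_true, PySem.Set.contains_eq_listContains]
        simp only [List.contains_eq_mem, decide_eq_false_iff_not]
        exact hkeep)]
      rw [List.map_cons, ih (n+1) stack R (fun i h => lt_trans (hR i h) (by omega))]
      simp [aKeep, ho, hc]

-- ===== VERDICT (by name: the statement is the Claim_ definition above) =====
theorem helper_spec : Claim_equal_helper := by
  intro string open_ close _
  unfold Spec_helper helper helper_alt
  rw [aFold_eq_aKeep]
  rw [main_lemma open_ close string.toList 0 [] PySem.Set.empty (by intro i hi; simp [PySem.Set.empty] at hi)]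
  simp
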